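-- pv_equiv track=rewrite | github.com/jplumail/videoclub | extractor/extractor/extract/extract.py | get_directors_names
-- ===== SOURCE A (Python) =====
-- def recursive_strip(s: str, char: str) -> str:
--     if s.strip() == s and not s.startswith(char) and not s.endswith(char):
--         return s
--     else:
--         return recursive_strip(s.strip().strip(char), char)
--
-- def get_directors_names(details: str, years: list[int]):
--     s = details
--     if years:
--         for year in years:
--             s = s.replace(str(year), "")
--     s = recursive_strip(s, "-")
--     directors = s.split("&")
--     directors = [director.strip() for director in directors]
--     return directors
-- ===== SOURCE B (Python) =====
-- def get_directors_names(details: str, years: list[int]):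
--     s = details
--     for year in years:
--         s = s.replace(str(year), "")
--     s = s.strip(" \t\n\x0b\x0c\r-")
--     return [director.strip() for director in s.split("&")]
-- ===== Notes on version B (the rewrite author's own statement) =====
-- stated objective: simpler
-- what changed: Replaces the recursive fixpoint helper recursive_strip (alternate .strip()/.strip('-') until stable) with a single str.strip over the combined character class of ASCII whitespace and '-', and drops the redundant 'if years:' guard; equal on the ASCII input domain.
import Mathlib
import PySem

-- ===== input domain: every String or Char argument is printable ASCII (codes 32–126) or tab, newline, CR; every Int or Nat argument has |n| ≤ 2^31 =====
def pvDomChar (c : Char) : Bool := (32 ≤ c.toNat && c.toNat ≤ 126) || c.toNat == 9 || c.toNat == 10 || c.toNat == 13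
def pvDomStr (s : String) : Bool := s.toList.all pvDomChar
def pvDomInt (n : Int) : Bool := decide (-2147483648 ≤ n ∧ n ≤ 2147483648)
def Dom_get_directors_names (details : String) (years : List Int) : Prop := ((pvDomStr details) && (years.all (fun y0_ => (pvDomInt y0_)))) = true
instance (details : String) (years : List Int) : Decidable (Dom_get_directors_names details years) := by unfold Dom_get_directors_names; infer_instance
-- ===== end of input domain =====

-- B replaces A's recursive fixpoint helper (alternate .strip()/.strip('-') until stable) with a
-- single strip over the combined character class "whitespace or '-'"; equal on the ASCII domain.

-- ===== PORT A =====
-- fuel = length of the string + 1; each recursive call strictly shortens the string, so the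
-- fuel is never exhausted (a totality guard only, not part of A's algorithm)
def recursive_strip (fuel : Nat) (s : String) (ch : String) : String :=
  match fuel with
  | 0 => s
  | f + 1 =>
    if (PySem.Str.strip s == s) && !(PySem.Str.startswith s ch) && !(PySem.Str.endswith s ch) then
      s
    else
      recursive_strip f (PySem.Str.stripChars (PySem.Str.strip s) ch) ch

def get_directors_names (details : String) (years : List Int) : List String :=
  let s := details
  let s := if years.isEmpty then s
           else years.foldl (fun s year => PySem.Str.replace s (PySem.Int.toStr year) "") s
  let s := recursive_strip ((PySem.Str.len s).toNat + 1) s "-"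
  let directors := (PySem.Str.split? s "&").getD []   -- sep "&" is non-empty, so split? is `some`
  directors.map (fun director => PySem.Str.strip director)

-- ===== PORT B =====
def get_directors_names_alt (details : String) (years : List Int) : List String :=
  let s := years.foldl (fun s year => PySem.Str.replace s (PySem.Int.toStr year) "") details
  let s := PySem.Str.stripChars s " \t\n\x0b\x0c\r-"
  ((PySem.Str.split? s "&").getD []).map (fun director => PySem.Str.strip director)

-- ===== PRECONDITION & SPEC =====
def Spec_get_directors_names (details : String) (years : List Int) (out : List String) : Prop := out = get_directors_names_alt details years
instance (details : String) (years : List Int) (out : List String) : Decidable (Spec_get_directors_names details years out) := by unfold Spec_get_directors_names; infer_instance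

-- ===== CLAIM (what is proved, stated in full; the proofs are below) =====
def Claim_equal_get_directors_names : Prop := ∀ (details : String) (years : List Int), Dom_get_directors_names details years → Spec_get_directors_names details years (get_directors_names details years)

-- ===== LEMMAS AND PROOFS =====

-- right dropWhile (drop the maximal p-suffix)
def rdw (p : Char → Bool) (l : List Char) : List Char := (l.reverse.dropWhile p).reverse

-- the combined predicate: Python whitespace or '-'
def qs (c : Char) : Bool := PySem.Chars.isspace c || c == '-'

-- B's strip-character class as a predicate
def pB (c : Char) : Bool := ([' ','\t','\n','\x0b','\x0c','\r','-']).contains c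

theorem stripChars_eq_rdw (l chars : List Char) :
    PySem.Chars.stripChars l chars = rdw (fun c => chars.contains c) (l.dropWhile (fun c => chars.contains c)) := by
  simp [PySem.Chars.stripChars, rdw]

theorem strip_eq_rdw (l : List Char) :
    PySem.Chars.strip l = rdw PySem.Chars.isspace (l.dropWhile PySem.Chars.isspace) := by
  simp [PySem.Chars.strip, PySem.Chars.lstrip, PySem.Chars.rstrip, rdw]

theorem dropWhile_absorb {p q : Char → Bool} (h : ∀ c, p c = true → q c = true) (l : List Char) :
    (l.dropWhile p).dropWhile q = l.dropWhile q := by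
  induction l with
  | nil => rfl
  | cons a t ih =>
    by_cases hp : p a
    · simp [List.dropWhile_cons, hp, h a hp, ih]
    · simp [List.dropWhile_cons, hp]

theorem rdw_absorb {p q : Char → Bool} (h : ∀ c, p c = true → q c = true) (l : List Char) :
    rdw q (rdw p l) = rdw q l := by
  simp [rdw, dropWhile_absorb h]

theorem rdw_cons (p : Char → Bool) (a : Char) (t : List Char) :
    rdw p (a :: t) = if rdw p t = [] then (if p a then [] else [a]) else a :: rdw p t := by
  simp only [rdw, List.reverse_cons, List.dropWhile_append]
  by_cases h : t.reverse.dropWhile p = []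
  · simp only [h, List.isEmpty_nil, if_true, List.reverse_nil, List.dropWhile]
    by_cases hp : p a <;> simp [hp]
  · simp [h, List.isEmpty_iff]

theorem dropWhile_rdw_comm (p q : Char → Bool) (l : List Char) :
    (rdw p l).dropWhile q = rdw p (l.dropWhile q) := by
  induction l with
  | nil => rfl
  | cons a t ih =>
    rw [rdw_cons, List.dropWhile_cons]
    by_cases hq : q a
    · simp only [hq, if_true]
      by_cases h0 : rdw p t = []
      · have h1 : rdw p (t.dropWhile q) = [] := by rw [← ih, h0]; rfl
        rw [if_pos h0, h1]
        by_cases hp : p a <;> simp [hp, hq]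
      · rw [if_neg h0, List.dropWhile_cons, if_pos hq]
        exact ih
    · rw [if_neg hq, rdw_cons]
      by_cases h0 : rdw p t = []
      · rw [if_pos h0]
        by_cases hp : p a <;> simp [hp, hq]
      · rw [if_neg h0, List.dropWhile_cons, if_neg hq]

theorem dropWhile_congr' {p q : Char → Bool} (l : List Char) (h : ∀ c ∈ l, p c = q c) :
    l.dropWhile p = l.dropWhile q := by
  induction l with
  | nil => rfl
  | cons a t ih =>
    have ha := h a (by simp)
    by_cases hp : p a
    · simp [List.dropWhile_cons, hp, ← ha, ih fun c hc => h c (by simp [hc])]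
    · simp [List.dropWhile_cons, hp, ← ha]

theorem rdw_congr {p q : Char → Bool} (l : List Char) (h : ∀ c ∈ l, p c = q c) :
    rdw p l = rdw q l := by
  simp only [rdw]
  rw [dropWhile_congr' l.reverse (fun c hc => h c (List.mem_reverse.mp hc))]

theorem rdw_sublist (p : Char → Bool) (l : List Char) : (rdw p l).Sublist l := by
  have := List.dropWhile_sublist (l := l.reverse) (p := p)
  simpa [rdw] using this.reverse

theorem char_toNat_inj {c d : Char} (h : c.toNat = d.toNat) : c = d :=
  Char.ext (UInt32.toNat_inj.mp h)

-- whitespace implies qs, '-' implies qs (globally)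
theorem ws_le_qs : ∀ c, PySem.Chars.isspace c = true → qs c = true := by
  intro c h; simp [qs, h]

theorem pd_le_qs : ∀ c : Char, (([ '-' ] : List Char).contains c) = true → qs c = true := by
  intro c h
  simp only [List.contains_cons, List.contains_nil, Bool.or_false, beq_iff_eq] at h
  simp [qs, h]

-- on domain characters, B's class agrees with qs
theorem pB_eq_qs_of_dom {c : Char} (h : pvDomChar c = true) : pB c = qs c := by
  have hd : ∀ d : Char, (c == d) = decide (c.toNat = d.toNat) := by
    intro d
    by_cases hcd : c = d
    · simp [hcd]
    · have hne : c.toNat ≠ d.toNat := fun hn => hcd (char_toNat_inj hn)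
      simp [hcd, hne]
  simp only [pvDomChar, Bool.or_eq_true, Bool.and_eq_true, beq_iff_eq, decide_eq_true_eq] at h
  simp only [pB, qs, PySem.Chars.isspace, List.contains_cons, List.contains_nil, Bool.or_false,
    hd, show (' ' : Char).toNat = 32 from rfl, show ('\t' : Char).toNat = 9 from rfl,
    show ('\n' : Char).toNat = 10 from rfl, show ('\x0b' : Char).toNat = 11 from rfl,
    show ('\x0c' : Char).toNat = 12 from rfl, show ('\r' : Char).toNat = 13 from rfl,
    show ('-' : Char).toNat = 45 from rfl]
  rw [Bool.eq_iff_iff]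
  simp only [Bool.or_eq_true, Bool.and_eq_true, decide_eq_true_eq]
  omega

-- A's one stripping step, fully inside the qs class: stripping it first changes nothing
theorem step_absorb (l : List Char) :
    rdw qs ((PySem.Chars.stripChars (PySem.Chars.strip l) ['-']).dropWhile qs)
      = rdw qs (l.dropWhile qs) := by
  rw [stripChars_eq_rdw, strip_eq_rdw]
  rw [dropWhile_rdw_comm, dropWhile_absorb pd_le_qs, dropWhile_rdw_comm,
      dropWhile_absorb ws_le_qs, rdw_absorb pd_le_qs, rdw_absorb ws_le_qs]

theorem stripChars_sublist (l chars : List Char) : (PySem.Chars.stripChars l chars).Sublist l := by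
  rw [stripChars_eq_rdw]
  exact ((rdw_sublist _ _).trans (List.dropWhile_sublist _))

theorem strip_sublist (l : List Char) : (PySem.Chars.strip l).Sublist l := by
  rw [strip_eq_rdw]
  exact ((rdw_sublist _ _).trans (List.dropWhile_sublist _))

-- from `strip l = l` both one-sided strips are the identity
theorem strip_id_parts {l : List Char} (h : PySem.Chars.strip l = l) :
    l.dropWhile PySem.Chars.isspace = l ∧ rdw PySem.Chars.isspace l = l := by
  rw [strip_eq_rdw] at h
  have s1 := List.dropWhile_sublist (l := l) (p := PySem.Chars.isspace)
  have s2 := rdw_sublist PySem.Chars.isspace (l.dropWhile PySem.Chars.isspace)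
  have hlen : (l.dropWhile PySem.Chars.isspace).length = l.length := by
    have h2 := s2.length_le
    have h1 := s1.length_le
    rw [h] at h2
    omega
  have h1 : l.dropWhile PySem.Chars.isspace = l := s1.eq_of_length hlen
  rw [h1] at h
  exact ⟨h1, h⟩

-- head character neither whitespace nor '-' ⇒ dropping qs-chars from the left is the identity
theorem dropWhile_qs_id {l : List Char}
    (h1 : l.dropWhile PySem.Chars.isspace = l) (h2 : (['-'] : List Char).isPrefixOf l = false) :
    l.dropWhile qs = l := by
  cases l with
  | nil => rfl
  | cons a t =>
    have hws : PySem.Chars.isspace a = false := by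
      by_cases hw : PySem.Chars.isspace a
      · rw [List.dropWhile_cons, if_pos hw] at h1
        have := (List.dropWhile_sublist (l := t) (p := PySem.Chars.isspace)).length_le
        rw [h1] at this
        simp at this
      · simpa using hw
    have hda : ¬ a = '-' := by
      simp only [List.isPrefixOf, Bool.and_eq_false_iff, beq_eq_false_iff_ne] at h2
      rcases h2 with h | h
      · exact fun e => h e.symm
      · simp [List.isPrefixOf] at h
    rw [List.dropWhile_cons, if_neg]
    simp [qs, hws, hda]

theorem rdw_qs_id {l : List Char}
    (h1 : rdw PySem.Chars.isspace l = l) (h2 : (['-'] : List Char).isSuffixOf l = false) :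
    rdw qs l = l := by
  have h1' : l.reverse.dropWhile PySem.Chars.isspace = l.reverse := by
    have := congrArg List.reverse h1
    simpa [rdw] using this
  have h2' : (['-'] : List Char).isPrefixOf l.reverse = false := h2
  have := dropWhile_qs_id h1' h2'
  rw [rdw, this, List.reverse_reverse]

-- the stopping condition forces the combined strip to be the identity
theorem stop_id {l : List Char}
    (h1 : PySem.Chars.strip l = l) (h2 : (['-'] : List Char).isPrefixOf l = false)
    (h3 : (['-'] : List Char).isSuffixOf l = false) :
    rdw qs (l.dropWhile qs) = l := by
  obtain ⟨ha, hb⟩ := strip_id_parts h1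
  rw [dropWhile_qs_id ha h2]
  exact rdw_qs_id hb h3

-- strict decrease of A's step when the stopping condition fails
theorem step_lt (l : List Char)
    (h : ¬ (PySem.Chars.strip l = l ∧ (['-'] : List Char).isPrefixOf l = false ∧ (['-'] : List Char).isSuffixOf l = false)) :
    (PySem.Chars.stripChars (PySem.Chars.strip l) ['-']).length < l.length := by
  have hle := (stripChars_sublist (PySem.Chars.strip l) ['-']).length_le
  by_cases hs : PySem.Chars.strip l = l
  · rw [hs] at hle ⊢
    have hpq : ¬ ((['-'] : List Char).isPrefixOf l = false ∧ (['-'] : List Char).isSuffixOf l = false) := by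
      intro hc; exact h ⟨hs, hc⟩
    rw [stripChars_eq_rdw]
    by_cases hp : (['-'] : List Char).isPrefixOf l
    · -- l starts with '-'
      obtain ⟨t, rfl⟩ : ∃ t, l = '-' :: t := by
        cases l with
        | nil => simp [List.isPrefixOf] at hp
        | cons a t =>
          simp only [List.isPrefixOf, Bool.and_true, beq_iff_eq] at hp
          exact ⟨t, by rw [hp]⟩
      have hdw : (('-' :: t).dropWhile fun c => (['-'] : List Char).contains c) = t.dropWhile fun c => (['-'] : List Char).contains c := by
        rw [List.dropWhile_cons, if_pos (by simp)]
      rw [hdw]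
      have hsub : (rdw (fun c => (['-'] : List Char).contains c) (t.dropWhile fun c => (['-'] : List Char).contains c)).length ≤ t.length :=
        ((rdw_sublist (fun c => (['-'] : List Char).contains c) (t.dropWhile fun c => (['-'] : List Char).contains c)).trans
          (List.dropWhile_sublist (fun c => (['-'] : List Char).contains c))).length_le
      simp only [List.length_cons]
      omega
    · -- l ends with '-' (and does not start with one, and is untouched by dropWhile '-')
      have hp' : (['-'] : List Char).isPrefixOf l = false := by
        cases hy : (['-'] : List Char).isPrefixOf l
        · rfl
        · exact absurd hy hp
      have hsuf : (['-'] : List Char).isSuffixOf l = true := by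
        cases hx : (['-'] : List Char).isSuffixOf l
        · exact absurd ⟨hp', hx⟩ hpq
        · rfl
      have hdw : (l.dropWhile fun c => (['-'] : List Char).contains c) = l := by
        cases l with
        | nil => rfl
        | cons a t =>
          have hda : ¬ (['-'] : List Char).contains a = true := by
            simp only [List.contains_cons, List.contains_nil, Bool.or_false, beq_iff_eq]
            intro e
            exact hp (by simp [List.isPrefixOf, e])
          rw [List.dropWhile_cons, if_neg hda]
      rw [hdw]
      -- l.reverse = '-' :: t'
      obtain ⟨t, ht⟩ : ∃ t, l.reverse = '-' :: t := by
        have : (['-'] : List Char).isPrefixOf l.reverse = true := hsuf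
        cases hr : l.reverse with
        | nil => rw [hr] at this; simp [List.isPrefixOf] at this
        | cons a t =>
          rw [hr] at this
          simp only [List.isPrefixOf, Bool.and_true, beq_iff_eq] at this
          exact ⟨t, by rw [this]⟩
      have : (rdw (fun c => (['-'] : List Char).contains c) l).length < l.length := by
        rw [rdw, ht, List.dropWhile_cons, if_pos (by simp)]
        have := (List.dropWhile_sublist (l := t) (p := fun c => (['-'] : List Char).contains c)).length_le
        have hlen : l.length = t.length + 1 := by
          have := congrArg List.length ht
          simpa using this
        simp only [List.length_reverse]
        omega
      exact this
  · -- strip l is strictly shorter than l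
    have hsl := (strip_sublist l).length_le
    have hne : (PySem.Chars.strip l).length ≠ l.length := fun he => hs ((strip_sublist l).eq_of_length he)
    omega

-- main loop lemma: with enough fuel, A's recursion computes the combined both-ends strip
theorem recursive_strip_eq (fuel : Nat) (l : List Char) (hf : l.length < fuel) :
    (recursive_strip fuel (String.ofList l) "-").toList = rdw qs (l.dropWhile qs) := by
  induction fuel generalizing l with
  | zero => omega
  | succ f ih =>
    rw [recursive_strip]
    have hcond : ((PySem.Str.strip (String.ofList l) == String.ofList l)
        && !(PySem.Str.startswith (String.ofList l) "-")
        && !(PySem.Str.endswith (String.ofList l) "-")) = true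
        ↔ (PySem.Chars.strip l = l ∧ (['-'] : List Char).isPrefixOf l = false
            ∧ (['-'] : List Char).isSuffixOf l = false) := by
      simp only [Bool.and_eq_true, beq_iff_eq, Bool.not_eq_true', PySem.Str.strip,
        PySem.Str.startswith, PySem.Str.endswith, PySem.Chars.startswith, PySem.Chars.endswith,
        ← String.toList_inj, String.toList_ofList, show ("-" : String).toList = ['-'] from rfl]
      tauto
    by_cases hc : PySem.Chars.strip l = l ∧ (['-'] : List Char).isPrefixOf l = false
        ∧ (['-'] : List Char).isSuffixOf l = false
    · rw [if_pos (hcond.mpr hc), String.toList_ofList]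
      exact (stop_id hc.1 hc.2.1 hc.2.2).symm
    · rw [if_neg (fun ht => hc (hcond.mp ht))]
      have harg : PySem.Str.stripChars (PySem.Str.strip (String.ofList l)) "-"
          = String.ofList (PySem.Chars.stripChars (PySem.Chars.strip l) ['-']) := by
        simp [PySem.Str.stripChars, PySem.Str.strip,
          show ("-" : String).toList = ['-'] from rfl]
      rw [harg]
      have hlt := step_lt l hc
      rw [ih _ (by omega)]
      exact step_absorb l

-- every character of `replace.go old new fuel l acc` comes from l, acc or new
theorem replace_go_mem (old new : List Char) (fuel : Nat) (l acc : List Char)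
    {P : Char → Bool} (hl : ∀ c ∈ l, P c = true) (ha : ∀ c ∈ acc, P c = true)
    (hn : ∀ c ∈ new, P c = true) :
    ∀ c ∈ PySem.Chars.replace.go old new fuel l acc, P c = true := by
  induction fuel generalizing l acc with
  | zero =>
    rw [PySem.Chars.replace.go.eq_def]
    intro c hc
    simp only [List.mem_append, List.mem_reverse] at hc
    rcases hc with hc | hc
    · exact ha c hc
    · exact hl c hc
  | succ f ih =>
    cases l with
    | nil =>
      rw [PySem.Chars.replace.go.eq_def]
      intro c hc
      simp only [List.mem_reverse] at hc
      exact ha c hc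
    | cons a t =>
      have hstep : PySem.Chars.replace.go old new (f+1) (a::t) acc
          = if old.isPrefixOf (a::t) then
              PySem.Chars.replace.go old new f (List.drop old.length (a::t)) (new.reverse ++ acc)
            else PySem.Chars.replace.go old new f t (a :: acc) := by
        conv_lhs => rw [PySem.Chars.replace.go.eq_def]
      rw [hstep]
      by_cases hpre : old.isPrefixOf (a :: t)
      · rw [if_pos hpre]
        exact ih _ _ (fun c hc => hl c (List.drop_subset _ _ hc))
          (fun c hc => by
            rcases List.mem_append.mp hc with h | h
            · exact hn c (List.mem_reverse.mp h)
            · exact ha c h)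
      · rw [if_neg hpre]
        exact ih _ _ (fun c hc => hl c (List.mem_cons_of_mem a hc))
          (fun c hc => by
            rcases List.mem_cons.mp hc with h | h
            · exact hl c (h ▸ List.mem_cons_self)
            · exact ha c h)

theorem replace_mem (m old new : List Char) {P : Char → Bool}
    (hm : ∀ c ∈ m, P c = true) (hn : ∀ c ∈ new, P c = true) :
    ∀ c ∈ PySem.Chars.replace m old new, P c = true := by
  rw [PySem.Chars.replace]
  by_cases he : old.isEmpty
  · rw [if_pos he]
    intro c hc
    rcases List.mem_append.mp hc with h | h
    · exact hn c h
    · rcases List.mem_flatMap.mp h with ⟨d, hd, hcd⟩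
      rcases List.mem_cons.mp hcd with h' | h'
      · exact h' ▸ hm d hd
      · exact hn c h'
  · rw [if_neg he]
    exact replace_go_mem old new m.length m [] hm (by simp) hn

theorem fold_replace_dom (years : List Int) (s : String) (hs : pvDomStr s = true) :
    pvDomStr (years.foldl (fun s year => PySem.Str.replace s (PySem.Int.toStr year) "") s) = true := by
  induction years generalizing s with
  | nil => exact hs
  | cons y ys ih =>
    rw [List.foldl_cons]
    apply ih
    simp only [pvDomStr, List.all_eq_true] at hs ⊢
    intro c hc
    refine replace_mem s.toList (PySem.Int.toStr y).toList [] hs (by simp) c ?_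
    simpa [PySem.Str.replace] using hc

-- the two final strings agree
theorem strings_agree (s : String) (hs : pvDomStr s = true) :
    recursive_strip ((PySem.Str.len s).toNat + 1) s "-" = PySem.Str.stripChars s " \t\n\x0b\x0c\r-" := by
  rw [← String.toList_inj]
  have hofl : String.ofList s.toList = s := by simp
  have hlen : ((PySem.Str.len s).toNat + 1) = s.toList.length + 1 := by
    simp [PySem.Str.len]
  have hA := recursive_strip_eq (s.toList.length + 1) s.toList (by omega)
  rw [hofl] at hA
  rw [hlen, hA]
  simp only [pvDomStr, List.all_eq_true] at hs
  have hmem : ∀ c ∈ s.toList, pB c = qs c := fun c hc => pB_eq_qs_of_dom (hs c hc)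
  rw [PySem.Str.stripChars, String.toList_ofList, String.toList_ofList, stripChars_eq_rdw]
  have h1 : s.toList.dropWhile (fun c => ([' ','\t','\n','\x0b','\x0c','\r','-'] : List Char).contains c)
      = s.toList.dropWhile qs := dropWhile_congr' _ hmem
  rw [h1]
  refine (rdw_congr _ fun c hc => ?_).symm
  exact hmem c ((List.dropWhile_sublist _).mem hc)

-- ===== VERDICT (by name: the statement is the Claim_ definition above) =====
theorem get_directors_names_spec : Claim_equal_get_directors_names := by
  intro details years hdom
  unfold Spec_get_directors_names get_directors_names get_directors_names_alt
  simp only []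
  have hguard : (if years.isEmpty then details
      else years.foldl (fun s year => PySem.Str.replace s (PySem.Int.toStr year) "") details)
      = years.foldl (fun s year => PySem.Str.replace s (PySem.Int.toStr year) "") details := by
    cases years <;> simp
  rw [hguard]
  have hdom' : pvDomStr details = true := by
    unfold Dom_get_directors_names at hdom
    simp only [Bool.and_eq_true] at hdom
    exact hdom.1
  rw [strings_agree _ (fold_replace_dom years details hdom')]
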